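-- pv_equiv track=rewrite | github.com/CarlaMalo/MedNLP-Multitask | ner/utils.py | __find_contained_rows
-- ===== SOURCE A (Python) =====
-- def __find_contained_rows(starts_, ends_):
--     assert (len(starts_) == len(ends_))
--     contained = []
--
--     for i, (s1, e1) in enumerate(zip(starts_, ends_)):
--         for j, (s2, e2) in enumerate(zip(starts_, ends_)):
--             if i == j:
--                 continue
--
--             # span i is inside span j
--             if s2 <= s1 and e1 <= e2:
--                 contained.append((i,j))
--                 break
--     return contained
-- ===== SOURCE B (Python) =====
-- def __find_contained_rows(starts_, ends_):
--     assert (len(starts_) == len(ends_))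
--     n = len(starts_)
--     container = {}
--     remaining = list(range(n))
--     for j in range(n):
--         s, e = starts_[j], ends_[j]
--         still = []
--         for i in remaining:
--             if i != j and s <= starts_[i] and ends_[i] <= e:
--                 container[i] = j
--             else:
--                 still.append(i)
--         remaining = still
--     return [(i, container[i]) for i in range(n) if i in container]
-- ===== Notes on version B (the rewrite author's own statement) =====
-- stated objective: alternative
-- what changed: B inverts the traversal: instead of scanning, for each span, all other spans for its first container (A), B sweeps candidate containers j in index order and assigns j to every still-unanswered span it contains, keeping a shrinking worklist of unanswered spans and a dict of answers; Pre_ excludes only length-mismatched inputs, on which A's assert raises AssertionError.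
import Mathlib
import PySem

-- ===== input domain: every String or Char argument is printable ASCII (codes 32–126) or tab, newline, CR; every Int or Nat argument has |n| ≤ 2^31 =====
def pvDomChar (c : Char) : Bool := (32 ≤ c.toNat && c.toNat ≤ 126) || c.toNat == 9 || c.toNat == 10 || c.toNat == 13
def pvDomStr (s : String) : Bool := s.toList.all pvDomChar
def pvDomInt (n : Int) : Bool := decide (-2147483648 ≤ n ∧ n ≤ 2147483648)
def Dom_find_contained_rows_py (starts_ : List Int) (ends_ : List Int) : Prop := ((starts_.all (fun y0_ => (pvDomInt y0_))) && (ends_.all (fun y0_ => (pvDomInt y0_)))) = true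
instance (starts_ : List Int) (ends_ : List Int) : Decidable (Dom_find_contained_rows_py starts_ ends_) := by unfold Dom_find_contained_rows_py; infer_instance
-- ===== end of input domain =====

-- B inverts the traversal: container-major sweep (each j claims the still-unanswered
-- spans it contains, worklist shrinks) instead of A's containee-major scan; same cost.

-- ===== PORT A =====
-- inner 'for j' loop of A: skip j == i, return the first j whose span contains (s1, e1)
def fcrInner : List (Int × Int × Int) → Int → Int → Int → Option Int
  | [], _, _, _ => none
  | (j, s2, e2) :: rest, i, s1, e1 =>
    if j = i then fcrInner rest i s1 e1
    else if s2 ≤ s1 ∧ e1 ≤ e2 then some j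
    else fcrInner rest i s1 e1

def find_contained_rows_py (starts_ : List Int) (ends_ : List Int) : List (Int × Int) :=
  let pairs := PySem.List.enumerate (starts_.zip ends_)
  pairs.foldl (fun acc x =>
    match fcrInner pairs x.1 x.2.1 x.2.2 with
    | some j => acc ++ [(x.1, j)]
    | none => acc) []

-- ===== PORT B =====
def find_contained_rows_py_alt (starts_ : List Int) (ends_ : List Int) : List (Int × Int) :=
  let n := starts_.length
  let res := (List.range n).foldl
    (fun (st : PySem.Dict Nat Nat × List Nat) j =>
      let s := starts_.getD j 0
      let e := ends_.getD j 0
      st.2.foldl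
        (fun (acc : PySem.Dict Nat Nat × List Nat) i =>
          if i ≠ j ∧ s ≤ starts_.getD i 0 ∧ ends_.getD i 0 ≤ e
          then (acc.1.insert i j, acc.2)
          else (acc.1, acc.2 ++ [i]))
        (st.1, ([] : List Nat)))
    (PySem.Dict.empty, List.range n)
  (List.range n).filterMap (fun i => (res.1.get? i).map (fun j => ((i : Int), (j : Int))))

-- ===== PRECONDITION & SPEC =====
-- A asserts len(starts_) == len(ends_) and raises AssertionError otherwise; Pre_ admits exactly the asserted inputs.
def Pre_find_contained_rows_py (starts_ : List Int) (ends_ : List Int) : Prop := starts_.length = ends_.length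
instance (starts_ : List Int) (ends_ : List Int) : Decidable (Pre_find_contained_rows_py starts_ ends_) := by unfold Pre_find_contained_rows_py; infer_instance
def pvWitness_find_contained_rows_py : List Int × List Int := ([0, 1], [3, 2])

def Spec_find_contained_rows_py (starts_ : List Int) (ends_ : List Int) (out : List (Int × Int)) : Prop := out = find_contained_rows_py_alt starts_ ends_
instance (starts_ : List Int) (ends_ : List Int) (out : List (Int × Int)) : Decidable (Spec_find_contained_rows_py starts_ ends_ out) := by unfold Spec_find_contained_rows_py; infer_instance

-- ===== CLAIM (what is proved, stated in full; the proofs are below) =====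
def Claim_equal_find_contained_rows_py : Prop := ∀ (starts_ : List Int) (ends_ : List Int), Dom_find_contained_rows_py starts_ ends_ → Pre_find_contained_rows_py starts_ ends_ → Spec_find_contained_rows_py starts_ ends_ (find_contained_rows_py starts_ ends_)

-- ===== LEMMAS AND PROOFS =====

-- shared reference predicate: j is a container of i (j ≠ i and span i inside span j)
def fcrCand (starts_ ends_ : List Int) (i j : Nat) : Bool :=
  (!(j == i)) && decide (starts_.getD j 0 ≤ starts_.getD i 0) && decide (ends_.getD i 0 ≤ ends_.getD j 0)

-- ---- A equals the find? reference ----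
lemma fcrInner_eq (starts_ ends_ : List Int) :
    ∀ (i : Nat) (l : List Nat),
    fcrInner (l.map (fun (k : Nat) => ((k : Int), starts_.getD k 0, ends_.getD k 0))) (i : Int)
        (starts_.getD i 0) (ends_.getD i 0)
      = (l.find? (fcrCand starts_ ends_ i)).map (fun (j : Nat) => (j : Int)) := by
  intro i l
  induction l with
  | nil => rfl
  | cons k l ih =>
    rw [List.map_cons, fcrInner]
    by_cases hki : ((k : Nat) : Int) = (i : Int)
    · rw [if_pos hki]
      have hk : k = i := by exact_mod_cast hki
      rw [List.find?_cons_of_neg (by simp [fcrCand, hk])]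
      exact ih
    · rw [if_neg hki]
      have hk : k ≠ i := fun h => hki (by exact_mod_cast congrArg Nat.cast h)
      by_cases hcond : starts_.getD k 0 ≤ starts_.getD i 0 ∧ ends_.getD i 0 ≤ ends_.getD k 0
      · rw [if_pos hcond]
        rw [List.find?_cons_of_pos (by
          simp only [fcrCand, Bool.and_eq_true, Bool.not_eq_eq_eq_not, Bool.not_true,
            beq_eq_false_iff_ne, ne_eq, decide_eq_true_eq]
          exact ⟨⟨hk, hcond.1⟩, hcond.2⟩)]
        rfl
      · rw [if_neg hcond]
        rw [List.find?_cons_of_neg ?_]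
        · exact ih
        · simp only [fcrCand, Bool.and_eq_true, Bool.not_eq_eq_eq_not, Bool.not_true,
            beq_eq_false_iff_ne, ne_eq, decide_eq_true_eq]
          rintro ⟨⟨-, h1⟩, h2⟩
          exact hcond ⟨h1, h2⟩

lemma fcrA_eq (starts_ ends_ : List Int) (hlen : starts_.length = ends_.length) :
    find_contained_rows_py starts_ ends_ =
      (List.range starts_.length).filterMap
        (fun i => ((List.range starts_.length).find? (fcrCand starts_ ends_ i)).map
          (fun (j : Nat) => ((i : Int), (j : Int)))) := by
  have hzlen : (starts_.zip ends_).length = starts_.length := by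
    rw [List.length_zip, ← hlen, min_self]
  have hpairs : PySem.List.enumerate (starts_.zip ends_) =
      (List.range starts_.length).map (fun (k : Nat) => ((k : Int), starts_.getD k 0, ends_.getD k 0)) := by
    apply List.ext_getElem
    · rw [PySem.List.length_enumerate, hzlen, List.length_map, List.length_range]
    · intro m h1 h2
      have hm : m < starts_.length := by
        rw [PySem.List.length_enumerate, hzlen] at h1; exact h1
      have hm2 : m < ends_.length := by omega
      rw [PySem.List.getElem_enumerate, List.getElem_map, List.getElem_range, List.getElem_zip]
      simp [List.getD_eq_getElem?_getD, hm, hm2]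
  have hbody : ∀ (k : Nat),
      fcrInner ((List.range starts_.length).map (fun (k : Nat) => ((k : Int), starts_.getD k 0, ends_.getD k 0)))
          ((k : Nat) : Int) (starts_.getD k 0) (ends_.getD k 0)
        = (((List.range starts_.length).find? (fcrCand starts_ ends_ k)).map (fun (j : Nat) => (j : Int))) :=
    fun k => fcrInner_eq starts_ ends_ k (List.range starts_.length)
  have hGen : ∀ (l : List Nat) (acc : List (Int × Int)),
      (l.foldl (fun acc k =>
        match fcrInner ((List.range starts_.length).map (fun (k : Nat) => ((k : Int), starts_.getD k 0, ends_.getD k 0)))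
            ((k : Nat) : Int) (starts_.getD k 0) (ends_.getD k 0) with
        | some j => acc ++ [(((k : Nat) : Int), j)]
        | none => acc) acc)
      = acc ++ l.filterMap (fun i => ((List.range starts_.length).find? (fcrCand starts_ ends_ i)).map
          (fun (j : Nat) => ((i : Int), (j : Int)))) := by
    intro l
    induction l with
    | nil => intro acc; simp
    | cons a l ihl =>
      intro acc
      rw [List.foldl_cons, List.filterMap_cons]
      cases hma : (List.range starts_.length).find? (fcrCand starts_ ends_ a) with
      | none =>
        rw [hbody a, hma]
        simp only [Option.map_none]
        exact ihl acc
      | some j =>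
        rw [hbody a, hma]
        simp only [Option.map_some]
        rw [ihl (acc ++ [((a : Int), (j : Int))]), List.append_assoc]
        rfl
  simp only [find_contained_rows_py]
  rw [hpairs, List.foldl_map]
  exact (hGen (List.range starts_.length) []).trans (by simp)

-- ---- B equals the find? reference ----

-- one inner pass over the worklist: claimed spans go into the dict, the rest stay
lemma fcrB_inner (starts_ ends_ : List Int) (j : Nat) :
    ∀ (l : List Nat) (d : PySem.Dict Nat Nat) (acc : List Nat),
    l.foldl
        (fun (acc : PySem.Dict Nat Nat × List Nat) i =>
          if i ≠ j ∧ starts_.getD j 0 ≤ starts_.getD i 0 ∧ ends_.getD i 0 ≤ ends_.getD j 0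
          then (acc.1.insert i j, acc.2)
          else (acc.1, acc.2 ++ [i])) (d, acc)
      = ((l.filter (fun i => fcrCand starts_ ends_ i j)).foldl (fun d i => d.insert i j) d,
         acc ++ l.filter (fun i => ! fcrCand starts_ ends_ i j)) := by
  intro l
  induction l with
  | nil => intro d acc; simp
  | cons a l ih =>
    intro d acc
    have hiff : (a ≠ j ∧ starts_.getD j 0 ≤ starts_.getD a 0 ∧ ends_.getD a 0 ≤ ends_.getD j 0)
        ↔ fcrCand starts_ ends_ a j = true := by
      simp only [fcrCand, Bool.and_eq_true, Bool.not_eq_eq_eq_not, Bool.not_true,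
        beq_eq_false_iff_ne, ne_eq, decide_eq_true_eq]
      constructor
      · rintro ⟨h1, h2, h3⟩; exact ⟨⟨fun h => h1 h.symm, h2⟩, h3⟩
      · rintro ⟨⟨h1, h2⟩, h3⟩; exact ⟨fun h => h1 h.symm, h2, h3⟩
    rw [List.foldl_cons]
    by_cases hc : fcrCand starts_ ends_ a j = true
    · rw [if_pos (hiff.mpr hc)]
      simp only [List.filter_cons, hc, Bool.not_true, if_true, List.foldl_cons]
      exact ih (d.insert a j) acc
    · rw [if_neg (fun h => hc (hiff.mp h))]
      have hc' : fcrCand starts_ ends_ a j = false := by simpa using hc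
      simp only [List.filter_cons, hc', Bool.not_false, if_true]
      rw [ih d (acc ++ [a]), List.append_assoc]
      rfl

-- inserting one value j under every key of ks
lemma fcrGet_insertAll (j : Nat) :
    ∀ (ks : List Nat) (d : PySem.Dict Nat Nat) (i : Nat),
    (ks.foldl (fun d k => d.insert k j) d).get? i = if i ∈ ks then some j else d.get? i := by
  intro ks
  induction ks with
  | nil => intro d i; simp
  | cons k ks ih =>
    intro d i
    rw [List.foldl_cons, ih (d.insert k j) i, PySem.Dict.get?_insert]
    by_cases h1 : i ∈ ks
    · simp [h1]
    · by_cases h2 : i = k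
      · simp [h2]
      · simp [h1, h2]

-- outer sweep invariant: after processing 'done', the dict holds each i's first
-- container among 'done' and the worklist holds exactly the unanswered indices
lemma fcrB_loop (starts_ ends_ : List Int) (n : Nat) :
    ∀ (js done : List Nat) (d : PySem.Dict Nat Nat) (rem : List Nat),
    done ++ js = List.range n →
    (∀ i, i < n → d.get? i = done.find? (fcrCand starts_ ends_ i)) →
    rem = (List.range n).filter (fun i => (done.find? (fcrCand starts_ ends_ i)).isNone) →
    ∀ i, i < n →
    (js.foldl
        (fun (st : PySem.Dict Nat Nat × List Nat) j =>
          st.2.foldl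
            (fun (acc : PySem.Dict Nat Nat × List Nat) i =>
              if i ≠ j ∧ starts_.getD j 0 ≤ starts_.getD i 0 ∧ ends_.getD i 0 ≤ ends_.getD j 0
              then (acc.1.insert i j, acc.2)
              else (acc.1, acc.2 ++ [i]))
            (st.1, ([] : List Nat)))
        (d, rem)).1.get? i
      = (List.range n).find? (fcrCand starts_ ends_ i) := by
  intro js
  induction js with
  | nil =>
    intro done d rem hsplit hd _ i hi
    rw [List.foldl_nil]
    rw [hd i hi]
    rw [List.append_nil] at hsplit
    rw [hsplit]
  | cons j js ih =>
    intro done d rem hsplit hd hrem i hi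
    rw [List.foldl_cons]
    simp only
    rw [fcrB_inner]
    have hd' : ∀ i, i < n →
        ((rem.filter (fun i => fcrCand starts_ ends_ i j)).foldl (fun d i => d.insert i j) d).get? i
          = (done ++ [j]).find? (fcrCand starts_ ends_ i) := by
      intro i hi
      rw [fcrGet_insertAll, List.find?_append]
      by_cases hirem : i ∈ rem
      · have hnone : done.find? (fcrCand starts_ ends_ i) = none := by
          have := (List.mem_filter.mp (hrem ▸ hirem)).2
          simpa [Option.isNone_iff_eq_none] using this
        rw [hnone]
        by_cases hc : fcrCand starts_ ends_ i j = true
        · have hmem : i ∈ rem.filter (fun i => fcrCand starts_ ends_ i j) :=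
            List.mem_filter.mpr ⟨hirem, hc⟩
          rw [if_pos hmem]
          simp [List.find?, hc]
        · have hnotmem : i ∉ rem.filter (fun i => fcrCand starts_ ends_ i j) :=
            fun h => hc (List.mem_filter.mp h).2
          rw [if_neg hnotmem]
          rw [hd i hi, hnone]
          simp [List.find?, hc]
      · have hnotmem : i ∉ rem.filter (fun i => fcrCand starts_ ends_ i j) :=
          fun h => hirem (List.mem_of_mem_filter h)
        rw [if_neg hnotmem]
        have hsome : ∃ v, done.find? (fcrCand starts_ ends_ i) = some v := by
          have hmem : i ∈ List.range n := List.mem_range.mpr hi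
          by_cases hno : (done.find? (fcrCand starts_ ends_ i)).isNone
          · exact absurd (hrem ▸ List.mem_filter.mpr ⟨hmem, by simpa using hno⟩) hirem
          · cases h : done.find? (fcrCand starts_ ends_ i) with
            | none => rw [h] at hno; simp at hno
            | some v => exact ⟨v, rfl⟩
        obtain ⟨v, hv⟩ := hsome
        rw [hd i hi, hv]
        rfl
    have hrem' : ([] : List Nat) ++ rem.filter (fun i => ! fcrCand starts_ ends_ i j)
        = (List.range n).filter (fun i => ((done ++ [j]).find? (fcrCand starts_ ends_ i)).isNone) := by
      rw [List.nil_append, hrem, List.filter_filter]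
      apply List.filter_congr
      intro x _
      rw [List.find?_append]
      cases h : done.find? (fcrCand starts_ ends_ x) with
      | none =>
        cases h2 : fcrCand starts_ ends_ x j <;> simp [List.find?, h2]
      | some v => simp
    exact ih (done ++ [j]) _ _ (by rw [List.append_assoc]; exact hsplit) hd' hrem' i hi

lemma fcrB_eq (starts_ ends_ : List Int) :
    find_contained_rows_py_alt starts_ ends_ =
      (List.range starts_.length).filterMap
        (fun i => ((List.range starts_.length).find? (fcrCand starts_ ends_ i)).map
          (fun (j : Nat) => ((i : Int), (j : Int)))) := by
  simp only [find_contained_rows_py_alt]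
  apply List.filterMap_congr
  intro i hi
  have hi' : i < starts_.length := List.mem_range.mp hi
  have hinit : List.range starts_.length =
      (List.range starts_.length).filter
        (fun i => (([] : List Nat).find? (fcrCand starts_ ends_ i)).isNone) := by
    symm
    apply List.filter_eq_self.mpr
    intro a _
    simp [List.find?]
  rw [fcrB_loop starts_ ends_ starts_.length (List.range starts_.length) [] PySem.Dict.empty
    (List.range starts_.length) (by simp) (fun i _ => by simp [List.find?]) hinit i hi']
  cases (List.range starts_.length).find? (fcrCand starts_ ends_ i) <;> rfl

-- ===== VERDICT (by name: the statement is the Claim_ definition above) =====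
theorem find_contained_rows_py_spec : Claim_equal_find_contained_rows_py := by
  intro starts_ ends_ _hdom hpre
  unfold Spec_find_contained_rows_py
  rw [fcrA_eq starts_ ends_ hpre, fcrB_eq]
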